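-- pv_equiv track=rewrite | github.com/jandog8990/Python-Algorithm-Practice | Hashing/CardCounting.py | minCardPickup
-- ===== SOURCE A (Python) =====
-- from collections import defaultdict
--
-- def minCardPickup(cards: list[int]) -> int:
--     card_map = defaultdict(int)
--     dist = float("inf")
--     for i in range(len(cards)):
--         # check if current card is in the dict and get
--         # the previous index it was encountered
--         if cards[i] in card_map:
--             dist = min(dist, i - card_map[cards[i]] + 1)
--
--         # insert the current card in the index
--         card_map[cards[i]] = i
--
--     return dist if dist < float("inf") else -1
-- ===== SOURCE B (Python) =====
-- def minCardPickup(cards: list[int]) -> int: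
--     # Phase 1: index every card value to the ascending list of its positions.
--     positions = {}
--     for i, c in enumerate(cards):
--         positions.setdefault(c, []).append(i)
--     # Phase 2: the best window ends at two consecutive occurrences of one card.
--     best = None
--     for pos in positions.values():
--         for a, b in zip(pos, pos[1:]):
--             gap = b - a + 1
--             if best is None or gap < best:
--                 best = gap
--     return -1 if best is None else best
-- ===== Notes on version B (the rewrite author's own statement) =====
-- stated objective: alternative
-- what changed: Replaces A's single-pass running last-seen-index update with a two-phase structure: build a value-to-positions index dict in one pass, then scan consecutive position pairs per group for the minimum window.
import Mathlib
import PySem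

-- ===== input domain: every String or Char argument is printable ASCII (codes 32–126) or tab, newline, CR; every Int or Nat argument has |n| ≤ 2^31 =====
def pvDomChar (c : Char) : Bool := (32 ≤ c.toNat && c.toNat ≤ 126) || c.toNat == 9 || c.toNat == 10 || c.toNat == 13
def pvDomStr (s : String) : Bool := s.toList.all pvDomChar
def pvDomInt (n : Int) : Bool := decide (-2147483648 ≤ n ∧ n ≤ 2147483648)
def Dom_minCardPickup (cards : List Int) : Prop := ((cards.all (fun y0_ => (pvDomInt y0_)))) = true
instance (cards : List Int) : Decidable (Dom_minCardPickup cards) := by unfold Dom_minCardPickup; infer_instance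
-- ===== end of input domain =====

-- B replaces A's running last-seen-index pass with a two-phase build-positions-index-then-scan-groups structure; equivalence proved on all inputs.


-- ===== PORT A =====
-- float("inf") sentinel modeled as `none : Option Int` (all other values of dist are ints);
-- min(dist, v) with dist = inf is v, so the match below is exact.
def minCardPickup (cards : List Int) : Int :=
  let st := (PySem.List.pyRange 0 (cards.length : Int) 1).foldl
    (fun (s : PySem.Dict Int Int × Option Int) i =>
      let dist := if s.1.contains (PySem.List.pyGetD cards i 0) then
          some (match s.2 with
            | none => i - s.1.getD (PySem.List.pyGetD cards i 0) 0 + 1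
            | some d => min d (i - s.1.getD (PySem.List.pyGetD cards i 0) 0 + 1))
        else s.2
      (s.1.insert (PySem.List.pyGetD cards i 0) i, dist))
    (PySem.Dict.empty, none)
  match st.2 with | none => -1 | some d => d

-- ===== PORT B =====
-- inner loop body of Source B: `if best is None or gap < best: best = gap`
def altStep (best : Option Int) (p : Int × Int) : Option Int :=
  let gap := p.2 - p.1 + 1
  match best with
  | none => some gap
  | some b => if gap < b then some gap else some b

def minCardPickup_alt (cards : List Int) : Int :=
  let positions := (PySem.List.enumerate cards).foldl
      (fun d p => d.modify p.2 [] (· ++ [p.1])) (PySem.Dict.empty : PySem.Dict Int (List Int))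
  let best := positions.values.foldl
      (fun best pos => (pos.zip (PySem.List.slice pos (some 1) none)).foldl altStep best)
      none
  match best with | none => -1 | some b => b

-- ===== PRECONDITION & SPEC =====
def Spec_minCardPickup (cards : List Int) (out : Int) : Prop := out = minCardPickup_alt cards
instance (cards : List Int) (out : Int) : Decidable (Spec_minCardPickup cards out) := by unfold Spec_minCardPickup; infer_instance

-- ===== CLAIM (what is proved, stated in full; the proofs are below) =====
def Claim_equal_minCardPickup : Prop := ∀ (cards : List Int), Dom_minCardPickup cards → Spec_minCardPickup cards (minCardPickup cards)

-- ===== LEMMAS AND PROOFS =====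

-- min(o, v) with none = +inf
def ominA (o : Option Int) (v : Int) : Option Int :=
  some (match o with | none => v | some d => min d v)

theorem altStep_eq (o : Option Int) (p : Int × Int) : altStep o p = ominA o (p.2 - p.1 + 1) := by
  cases o with
  | none => rfl
  | some b =>
      simp only [altStep, ominA]
      split_ifs with h <;> simp <;> omega

theorem ominA_comm (o : Option Int) (v w : Int) : ominA (ominA o v) w = ominA (ominA o w) v := by
  cases o <;> simp [ominA, min_assoc, min_comm v w]

-- positions of value c in cards (ascending)
def posOf (c : Int) (cards : List Int) : List Int :=
  ((PySem.List.enumerate cards).filter (fun p => p.2 == c)).map (·.1)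

-- fold the consecutive-pair gaps of pos into o
def pairFold (o : Option Int) (pos : List Int) : Option Int :=
  (pos.zip pos.tail).foldl altStep o

theorem enumerate_append_singleton (xs : List Int) (x : Int) (s : Int) :
    PySem.List.enumerate (xs ++ [x]) s = PySem.List.enumerate xs s ++ [(s + xs.length, x)] := by
  induction xs generalizing s with
  | nil => simp [PySem.List.enumerate_nil, PySem.List.enumerate_cons]
  | cons a t ih =>
      simp [PySem.List.enumerate_cons, ih]
      ring_nf

theorem posOf_append (c : Int) (cards : List Int) (x : Int) :
    posOf c (cards ++ [x])
      = posOf c cards ++ (if x = c then [(cards.length : Int)] else []) := by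
  simp only [posOf, enumerate_append_singleton, List.filter_append, List.map_append]
  congr 1
  by_cases h : x = c
  · subst h; simp
  · have hb : (x == c) = false := by simp [h]
    simp [List.filter_cons, hb, h]

theorem mem_iff_posOf_ne_nil (c : Int) (cards : List Int) : c ∈ cards ↔ posOf c cards ≠ [] := by
  simp only [posOf, ne_eq, List.map_eq_nil_iff, List.filter_eq_nil_iff, not_forall]
  constructor
  · intro h
    have : c ∈ (PySem.List.enumerate cards).map (·.2) := by
      rw [PySem.List.map_snd_enumerate]; exact h
    rcases List.mem_map.mp this with ⟨p, hp, he⟩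
    exact ⟨p, hp, by simp [he]⟩
  · rintro ⟨p, hp, hc⟩
    have : p.2 ∈ (PySem.List.enumerate cards).map (·.2) := List.mem_map_of_mem hp
    rw [PySem.List.map_snd_enumerate] at this
    simpa [show p.2 = c by simpa using hc] using this

theorem zip_tail_append (l : List Int) (h : l ≠ []) (n : Int) :
    (l ++ [n]).zip (l ++ [n]).tail = l.zip l.tail ++ [(l.getLast h, n)] := by
  induction l with
  | nil => exact absurd rfl h
  | cons a t ih =>
      cases t with
      | nil => simp
      | cons b t' =>
          have := ih (by simp)
          simp only [List.cons_append, List.zip_cons_cons, List.tail_cons] at this ⊢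
          rw [show (b :: t' ++ [n]) = (b :: t') ++ [n] by simp] at *
          rw [this]
          simp [List.getLast_cons]

theorem pairFold_append (o : Option Int) (l : List Int) (h : l ≠ []) (n : Int) :
    pairFold o (l ++ [n]) = ominA (pairFold o l) (n - l.getLast h + 1) := by
  simp only [pairFold, zip_tail_append l h n, List.foldl_append, List.foldl_cons, List.foldl_nil]
  rw [altStep_eq]

theorem pairFold_singleton (o : Option Int) (n : Int) : pairFold o [n] = o := rfl

theorem pairFold_ominA (o : Option Int) (v : Int) (pos : List Int) :
    pairFold (ominA o v) pos = ominA (pairFold o pos) v := by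
  simp only [pairFold]
  induction pos.zip pos.tail generalizing o with
  | nil => rfl
  | cons p t ih =>
      simp only [List.foldl_cons, altStep_eq]
      rw [ominA_comm, ih]

-- the grouped fold: over keys ks, folding in the gaps of g c
def grpFold (ks : List Int) (g : Int → List Int) (o : Option Int) : Option Int :=
  ks.foldl (fun o c => pairFold o (g c)) o

theorem grpFold_ominA (ks : List Int) (g : Int → List Int) (o : Option Int) (v : Int) :
    grpFold ks g (ominA o v) = ominA (grpFold ks g o) v := by
  induction ks generalizing o with
  | nil => rfl
  | cons c t ih => simp only [grpFold, List.foldl_cons, pairFold_ominA] at *; rw [ih]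

theorem grpFold_congr (ks : List Int) (g g' : Int → List Int) (o : Option Int)
    (h : ∀ c ∈ ks, g' c = g c) : grpFold ks g' o = grpFold ks g o := by
  induction ks generalizing o with
  | nil => rfl
  | cons c t ih =>
      simp only [grpFold, List.foldl_cons] at *
      rw [h c (by simp)]
      exact ih _ (fun d hd => h d (List.mem_cons_of_mem _ hd))

-- appending one new final position n to the group of x folds in exactly one extra gap
theorem grpFold_update (ks : List Int) (g g' : Int → List Int) (x n : Int)
    (hnd : ks.Nodup) (hx : x ∈ ks)
    (hagree : ∀ c ∈ ks, c ≠ x → g' c = g c)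
    (hne : g x ≠ []) (hgx : g' x = g x ++ [n]) (o : Option Int) :
    grpFold ks g' o = ominA (grpFold ks g o) (n - (g x).getLast hne + 1) := by
  induction ks generalizing o with
  | nil => simp at hx
  | cons c t ih =>
      rcases List.nodup_cons.mp hnd with ⟨hct, hndt⟩
      simp only [grpFold, List.foldl_cons] at *
      by_cases hcx : c = x
      · subst hcx
        rw [hgx, pairFold_append _ _ hne]
        have hgt : ∀ d ∈ t, g' d = g d := fun d hd =>
          hagree d (by simp [hd]) (fun hdx => hct (hdx ▸ hd))
        rw [show (t.foldl (fun o c => pairFold o (g' c)) (ominA (pairFold o (g c)) (n - (g c).getLast hne + 1)))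
              = grpFold t g' (ominA (pairFold o (g c)) (n - (g c).getLast hne + 1)) from rfl,
            grpFold_congr t g g' _ hgt, grpFold_ominA]
        rfl
      · have hxt : x ∈ t := by
          rcases List.mem_cons.mp hx with h | h
          · exact absurd h.symm hcx
          · exact h
        rw [hagree c (by simp) hcx]
        exact ih hndt hxt (fun d hd hdx => hagree d (by simp [hd]) hdx) _

-- the loop state of port A, as a named definition (identical to the fold inside minCardPickup)
def Afold (cards : List Int) : PySem.Dict Int Int × Option Int :=
  (PySem.List.pyRange 0 (cards.length : Int) 1).foldl
    (fun (s : PySem.Dict Int Int × Option Int) i =>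
      let dist := if s.1.contains (PySem.List.pyGetD cards i 0) then
          some (match s.2 with
            | none => i - s.1.getD (PySem.List.pyGetD cards i 0) 0 + 1
            | some d => min d (i - s.1.getD (PySem.List.pyGetD cards i 0) 0 + 1))
        else s.2
      (s.1.insert (PySem.List.pyGetD cards i 0) i, dist))
    (PySem.Dict.empty, none)

theorem pyGetD_append_left (cards : List Int) (x : Int) (i : Int)
    (h0 : 0 ≤ i) (h1 : i < (cards.length : Int)) :
    PySem.List.pyGetD (cards ++ [x]) i 0 = PySem.List.pyGetD cards i 0 := by
  rw [PySem.List.pyGetD_eq_getElem (cards ++ [x]) 0 h0 (by simp; omega),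
      PySem.List.pyGetD_eq_getElem cards 0 h0 (by simpa using h1),
      List.getElem_append_left]

theorem Afold_main (cards : List Int) :
    (∀ c, (Afold cards).1.get? c = (posOf c cards).getLast?) ∧
    (Afold cards).2 = grpFold (PySem.Set.ofList cards) (fun c => posOf c cards) none := by
  induction cards using List.reverseRecOn with
  | nil => exact ⟨fun c => rfl, rfl⟩
  | append_singleton cards x ih =>
      obtain ⟨ihd, ihv⟩ := ih
      have hsplit : PySem.List.pyRange 0 ((cards ++ [x]).length : Int) 1
          = PySem.List.pyRange 0 (cards.length : Int) 1 ++ [(cards.length : Int)] := by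
        rw [show ((cards ++ [x]).length : Int) = (cards.length : Int) + 1 by simp,
            PySem.List.pyRange_one_succ_right (by positivity)]
      have hpre : (PySem.List.pyRange 0 (cards.length : Int) 1).foldl
          (fun (s : PySem.Dict Int Int × Option Int) i =>
            let dist := if s.1.contains (PySem.List.pyGetD (cards ++ [x]) i 0) then
                some (match s.2 with
                  | none => i - s.1.getD (PySem.List.pyGetD (cards ++ [x]) i 0) 0 + 1
                  | some d => min d (i - s.1.getD (PySem.List.pyGetD (cards ++ [x]) i 0) 0 + 1))
              else s.2
            (s.1.insert (PySem.List.pyGetD (cards ++ [x]) i 0) i, dist))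
          (PySem.Dict.empty, none) = Afold cards := by
        unfold Afold
        apply PySem.List.foldl_congr_mem
        intro acc i hi
        rcases (PySem.List.mem_pyRange_one).mp hi with ⟨h0, h1⟩
        rw [pyGetD_append_left cards x i h0 h1]
      have hx : PySem.List.pyGetD (cards ++ [x]) (cards.length : Int) 0 = x := by
        have h2 : ((cards.length : Int)) < (((cards ++ [x]).length : Int)) := by
          simp
        rw [PySem.List.pyGetD_eq_getElem (cards ++ [x]) 0 (by omega) h2]
        simp
      have hstep : Afold (cards ++ [x]) =
          ((Afold cards).1.insert x (cards.length : Int),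
           if (Afold cards).1.contains x then
             ominA (Afold cards).2 ((cards.length : Int) - (Afold cards).1.getD x 0 + 1)
           else (Afold cards).2) := by
        show ((PySem.List.pyRange 0 ((cards ++ [x]).length : Int) 1).foldl _ (PySem.Dict.empty, none)) = _
        rw [hsplit, List.foldl_append, hpre]
        simp only [List.foldl_cons, List.foldl_nil, hx]
        rfl
      have hcont : (Afold cards).1.contains x = ((posOf x cards).getLast?).isSome := by
        rw [PySem.Dict.contains_eq_isSome_get?, ihd x]
      constructor
      · intro c
        rw [hstep]
        simp only
        rw [PySem.Dict.get?_insert]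
        rw [posOf_append]
        by_cases hcx : c = x
        · subst hcx; simp
        · simp [hcx, Ne.symm hcx, ihd c]
      · rw [hstep]
        simp only
        by_cases hmem : x ∈ cards
        · have hne : posOf x cards ≠ [] := (mem_iff_posOf_ne_nil x cards).mp hmem
          have hcT : (Afold cards).1.contains x = true := by
            rw [hcont, List.getLast?_eq_some_getLast hne]; rfl
          have hgetD : (Afold cards).1.getD x 0 = (posOf x cards).getLast hne := by
            rw [PySem.Dict.getD_eq_get?_getD, ihd x, List.getLast?_eq_some_getLast hne]; rfl
          rw [hcT, if_pos rfl, hgetD, ihv]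
          rw [show PySem.Set.ofList (cards ++ [x]) = PySem.Set.ofList cards by
                rw [PySem.Set.ofList_append_singleton,
                    PySem.Set.add_of_mem (by rw [PySem.Set.mem_ofList]; exact hmem)]]
          rw [grpFold_update (PySem.Set.ofList cards)
                (fun c => posOf c cards) (fun c => posOf c (cards ++ [x])) x (cards.length : Int)
                (PySem.Set.nodup_ofList cards)
                (by rw [PySem.Set.mem_ofList]; exact hmem)
                (fun c _ hcx => by
                  show posOf c (cards ++ [x]) = posOf c cards
                  rw [posOf_append]; simp [Ne.symm hcx])
                hne
                (by
                  show posOf x (cards ++ [x]) = posOf x cards ++ [(cards.length : Int)]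
                  rw [posOf_append]; simp)]
        · have hne : posOf x cards = [] := by
            by_contra hne; exact hmem ((mem_iff_posOf_ne_nil x cards).mpr hne)
          have hcF : (Afold cards).1.contains x = false := by
            rw [hcont, hne]; rfl
          rw [hcF, if_neg (by simp), ihv]
          rw [PySem.Set.ofList_append_singleton,
              PySem.Set.add_of_not_mem (by rw [PySem.Set.mem_ofList]; exact hmem)]
          unfold grpFold
          rw [List.foldl_append]
          simp only [List.foldl_cons, List.foldl_nil]
          rw [show posOf x (cards ++ [x]) = [(cards.length : Int)] by
                rw [posOf_append, hne]; simp]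
          rw [pairFold_singleton]
          exact (grpFold_congr _ _ _ _ (fun c hc => by
            have hcc : c ∈ cards := by rwa [PySem.Set.mem_ofList] at hc
            have hcx : c ≠ x := fun h => hmem (h ▸ hcc)
            show posOf c (cards ++ [x]) = posOf c cards
            rw [posOf_append]; simp [Ne.symm hcx])).symm

-- B's positions dict: lookup is posOf, keys are the distinct cards
theorem alt_getD (cards : List Int) (c : Int) :
    ((PySem.List.enumerate cards).foldl
      (fun d p => d.modify p.2 [] (· ++ [p.1])) (PySem.Dict.empty : PySem.Dict Int (List Int))).getD c []
    = posOf c cards := by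
  rw [show (PySem.List.enumerate cards).foldl
        (fun d p => d.modify p.2 [] (· ++ [p.1])) (PySem.Dict.empty : PySem.Dict Int (List Int))
      = ((PySem.List.enumerate cards).map (fun p => (p.2, p.1))).foldl
        (fun d q => d.modify q.1 [] (· ++ [q.2])) PySem.Dict.empty by
    rw [List.foldl_map]]
  rw [PySem.Dict.getD_foldl_modify_append]
  rw [PySem.Dict.getD_empty]
  simp only [List.nil_append, posOf]
  rw [List.filter_map]
  rw [List.map_map]
  rfl

theorem alt_keys (cards : List Int) :
    ((PySem.List.enumerate cards).foldl
      (fun d p => d.modify p.2 [] (· ++ [p.1])) (PySem.Dict.empty : PySem.Dict Int (List Int))).keys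
    = PySem.Set.ofList cards := by
  rw [PySem.Dict.keys_foldl_modify_key]
  rw [PySem.Dict.keys_empty, PySem.List.map_snd_enumerate]
  exact PySem.Set.update_nil_left cards

theorem alt_eq_grpFold (cards : List Int) :
    minCardPickup_alt cards =
      match grpFold (PySem.Set.ofList cards) (fun c => posOf c cards) none with
      | none => -1 | some b => b := by
  unfold minCardPickup_alt
  simp only
  have hnd : ((PySem.List.enumerate cards).foldl
      (fun d p => d.modify p.2 [] (· ++ [p.1])) (PySem.Dict.empty : PySem.Dict Int (List Int))).keys.Nodup := by
    apply PySem.Dict.nodup_keys_foldl_modify_key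
    exact List.nodup_nil
  rw [PySem.Dict.values_eq_map_keys _ hnd []]
  rw [List.foldl_map]
  rw [alt_keys]
  congr 1
  apply PySem.List.foldl_congr_mem
  intro acc c _
  rw [PySem.List.slice_from_one, alt_getD]
  rfl

-- ===== VERDICT (by name: the statement is the Claim_ definition above) =====
theorem minCardPickup_spec : Claim_equal_minCardPickup := by
  intro cards _
  unfold Spec_minCardPickup
  rw [alt_eq_grpFold]
  rw [show minCardPickup cards =
        (match (Afold cards).2 with | none => -1 | some d => d) from rfl]
  rw [(Afold_main cards).2]
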